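-- pv_equiv track=rewrite | github.com/nimrod97/ex2-computational-biology | darwin_genetic_algorithm.py | permutate_mistakes
-- ===== SOURCE A (Python) =====
-- def permutate_mistakes(matrix):
--     # check if each number appears once in each row and col
--     permutate_mistakes = 0
--     appearances_rows = dict()
--     appearances_cols = dict()
--     # validate that each number appears once in every row and column in the matrix
--     for i in range(len(matrix)):
--         appearances_rows.clear()
--         appearances_cols.clear()
--         for j in range(len(matrix)):
--             if not matrix[i][j] in appearances_rows:
--                 appearances_rows[matrix[i][j]] = 1
--             else:
--                 appearances_rows[matrix[i][j]] += 1
--             if not matrix[j][i] in appearances_cols: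
--                 appearances_cols[matrix[j][i]] = 1
--             else:
--                 appearances_cols[matrix[j][i]] += 1
--
--         for key in appearances_rows.keys():
--             if appearances_rows[key] > 1:
--                 permutate_mistakes += appearances_rows[key] - 1
--         for key in appearances_cols.keys():
--             if appearances_cols[key] > 1:
--                 permutate_mistakes += appearances_cols[key] - 1
--     return permutate_mistakes
-- ===== SOURCE B (Python) =====
-- def permutate_mistakes(matrix):
--     n = len(matrix)
--     total = 0
--     for i in range(n):
--         row = sorted(matrix[i][j] for j in range(n))
--         col = sorted(matrix[j][i] for j in range(n))
--         total += sum(x == y for x, y in zip(row, row[1:]))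
--         total += sum(x == y for x, y in zip(col, col[1:]))
--     return total
-- ===== Notes on version B (the rewrite author's own statement) =====
-- stated objective: alternative
-- what changed: Replaced A's per-value counting dicts and second summation pass by a sort-then-scan: sort each row/column and count adjacent equal pairs, which equals the summed excess duplicates; no counting structure or key iteration remains.
import Mathlib
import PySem

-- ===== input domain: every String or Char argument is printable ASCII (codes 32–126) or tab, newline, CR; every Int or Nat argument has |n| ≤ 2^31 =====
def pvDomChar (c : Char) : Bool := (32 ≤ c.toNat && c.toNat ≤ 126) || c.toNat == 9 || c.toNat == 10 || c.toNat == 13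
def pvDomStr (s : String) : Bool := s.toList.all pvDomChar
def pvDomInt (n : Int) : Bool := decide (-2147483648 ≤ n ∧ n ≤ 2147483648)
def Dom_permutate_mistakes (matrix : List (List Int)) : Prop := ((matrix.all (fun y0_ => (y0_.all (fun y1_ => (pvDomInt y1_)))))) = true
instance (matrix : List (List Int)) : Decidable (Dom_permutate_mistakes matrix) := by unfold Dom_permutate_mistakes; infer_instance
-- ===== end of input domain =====

-- B replaces A's per-value counting dicts and key-iteration pass by sort-then-scan:
-- each row/column is sorted and adjacent equal pairs are counted (alternative algorithm, same O up to the sort's log factor).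

-- ===== PORT A =====
-- A's dict update: "if x not in d: d[x] = 1 else: d[x] += 1"
def pvCStep (d : PySem.Dict Int Int) (x : Int) : PySem.Dict Int Int :=
  if d.contains x = false then d.insert x 1 else d.insert x (d.getD x 0 + 1)

-- A's summation pass: "for key in d.keys(): if d[key] > 1: acc += d[key] - 1"
def pvSumPass (d : PySem.Dict Int Int) (acc : Int) : Int :=
  d.keys.foldl (fun a k => if d.getD k 0 > 1 then a + (d.getD k 0 - 1) else a) acc

def permutate_mistakes (matrix : List (List Int)) : Int :=
  let n : Int := matrix.length
  (PySem.List.pyRange 0 n 1).foldl (fun acc i =>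
    let p := (PySem.List.pyRange 0 n 1).foldl
      (fun (p : PySem.Dict Int Int × PySem.Dict Int Int) j =>
        (pvCStep p.1 (PySem.List.pyGetD (PySem.List.pyGetD matrix i []) j 0),
         pvCStep p.2 (PySem.List.pyGetD (PySem.List.pyGetD matrix j []) i 0)))
      (PySem.Dict.empty, PySem.Dict.empty)
    pvSumPass p.2 (pvSumPass p.1 acc)) 0

-- ===== PORT B =====
-- "sum(x == y for x, y in zip(l, l[1:]))"
def pvAdjDup (l : List Int) : Int :=
  (l.zip (PySem.List.slice l (some 1) none)).foldl
    (fun a p => a + (if p.1 = p.2 then 1 else 0)) 0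

def permutate_mistakes_alt (matrix : List (List Int)) : Int :=
  let n : Int := matrix.length
  (PySem.List.pyRange 0 n 1).foldl (fun total i =>
    let row := PySem.List.sorted ((PySem.List.pyRange 0 n 1).map
      (fun j => PySem.List.pyGetD (PySem.List.pyGetD matrix i []) j 0)) (fun x => x) false
    let col := PySem.List.sorted ((PySem.List.pyRange 0 n 1).map
      (fun j => PySem.List.pyGetD (PySem.List.pyGetD matrix j []) i 0)) (fun x => x) false
    total + pvAdjDup row + pvAdjDup col) 0

-- ===== PRECONDITION & SPEC =====
-- Python A raises IndexError as soon as some row is shorter than len(matrix); those inputs are excluded.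
def Pre_permutate_mistakes (matrix : List (List Int)) : Prop :=
  ∀ row ∈ matrix, matrix.length ≤ row.length
instance (matrix : List (List Int)) : Decidable (Pre_permutate_mistakes matrix) := by
  unfold Pre_permutate_mistakes; infer_instance

def pvWitness_permutate_mistakes : List (List Int) := [[1, 2], [2, 2]]

def Spec_permutate_mistakes (matrix : List (List Int)) (out : Int) : Prop := out = permutate_mistakes_alt matrix
instance (matrix : List (List Int)) (out : Int) : Decidable (Spec_permutate_mistakes matrix out) := by unfold Spec_permutate_mistakes; infer_instance

-- ===== CLAIM (what is proved, stated in full; the proofs are below) =====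
def Claim_equal_permutate_mistakes : Prop := ∀ (matrix : List (List Int)), Dom_permutate_mistakes matrix → Pre_permutate_mistakes matrix → Spec_permutate_mistakes matrix (permutate_mistakes matrix)

-- ===== LEMMAS AND PROOFS =====

-- A's update step is the "insert getD+1" counter step.
theorem pvCStep_eq (d : PySem.Dict Int Int) (x : Int) :
    pvCStep d x = d.insert x (d.getD x 0 + 1) := by
  unfold pvCStep
  by_cases h : d.contains x = false
  · rw [if_pos h, PySem.Dict.getD_of_not_contains d (0:Int) h]
    norm_num
  · rw [if_neg h]

-- the paired dict fold splits into two independent folds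
theorem pvPairFold {α : Type} (l : List α)
    (f g : PySem.Dict Int Int → α → PySem.Dict Int Int) :
    ∀ p : PySem.Dict Int Int × PySem.Dict Int Int,
      l.foldl (fun p j => (f p.1 j, g p.2 j)) p = (l.foldl f p.1, l.foldl g p.2) := by
  induction l with
  | nil => intro p; rfl
  | cons a t ih => intro p; simpa using ih (f p.1 a, g p.2 a)

theorem pvFoldCStep (xs : List Int) :
    xs.foldl pvCStep PySem.Dict.empty = PySem.Dict.counter xs := by
  rw [show (pvCStep : PySem.Dict Int Int → Int → PySem.Dict Int Int)
      = fun d x => d.insert x (d.getD x 0 + 1) from funext fun d => funext fun x => pvCStep_eq d x]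
  exact PySem.Dict.foldl_insert_getD_add_one_eq_counter xs

theorem pvFoldPos (xs : List Int) : ∀ (ys : List Int) (acc : Int), (∀ k ∈ ys, k ∈ xs) →
    ys.foldl (fun a k => if ((xs.count k : Int) > 1) then a + ((xs.count k : Int) - 1) else a) acc
      = acc + ((ys.map (fun k => (xs.count k : Int))).sum - ys.length) := by
  intro ys
  induction ys with
  | nil => intro acc _; simp
  | cons k t ih =>
      intro acc hmem
      have hk : 1 ≤ xs.count k := List.count_pos_iff.mpr (hmem k (by simp))
      have := ih (if ((xs.count k : Int) > 1) then acc + ((xs.count k : Int) - 1) else acc)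
        (fun x hx => hmem x (by simp [hx]))
      simp only [List.foldl_cons] at *
      rw [this]
      simp only [List.map_cons, List.sum_cons, List.length_cons]
      split_ifs with h
      · push_cast
        omega
      · push_cast at h ⊢
        omega

-- sum of counts over the distinct elements is the length
theorem pvSumCounts (xs : List Int) :
    ((PySem.Set.ofList xs).map (fun k => (xs.count k : Int))).sum = (xs.length : Int) := by
  have hperm : (PySem.Set.ofList xs).Perm xs.dedup := by
    rw [List.perm_ext_iff_of_nodup (PySem.Set.nodup_ofList xs) xs.nodup_dedup]
    intro a; simp [PySem.Set.mem_ofList]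
  have h1 : ((PySem.Set.ofList xs).map (fun k => (xs.count k : Int))).sum
      = ((xs.dedup.map (fun k => (xs.count k : Int))).sum) :=
    (hperm.map _).sum_eq
  have hcast : ∀ (ys : List Int), (ys.map (fun k => ((xs.count k : Nat) : Int))).sum
      = (((ys.map (xs.count ·)).sum : Nat) : Int) := by
    intro ys
    induction ys with
    | nil => simp
    | cons a t ih => simp [ih]
  rw [h1, hcast, List.sum_map_count_dedup_eq_length]

-- A's summation pass over a counter computes length - #distinct
theorem pvSumPass_counter (xs : List Int) (acc : Int) :
    pvSumPass (PySem.Dict.counter xs) acc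
      = acc + ((xs.length : Int) - ((PySem.Set.ofList xs).length : Int)) := by
  unfold pvSumPass
  have hfun : (fun (a : Int) (k : Int) =>
      if (PySem.Dict.counter xs).getD k 0 > 1 then a + ((PySem.Dict.counter xs).getD k 0 - 1) else a)
      = fun a k => if ((xs.count k : Int) > 1) then a + ((xs.count k : Int) - 1) else a := by
    funext a k; rw [PySem.Dict.getD_counter]
  rw [PySem.Dict.keys_counter, hfun,
    pvFoldPos xs (PySem.Set.ofList xs) acc (fun k hk => (PySem.Set.mem_ofList xs k).mp hk),
    pvSumCounts]

-- structural count of adjacent equal pairs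
def pvAdjN : List Int → Nat
  | [] => 0
  | [_] => 0
  | a :: b :: t => (if a = b then 1 else 0) + pvAdjN (b :: t)

theorem pvAdjDup_fold (l : List Int) : ∀ acc : Int,
    (l.zip l.tail).foldl (fun a p => a + (if p.1 = p.2 then 1 else 0)) acc
      = acc + (pvAdjN l : Int) := by
  induction l with
  | nil => intro acc; simp [pvAdjN]
  | cons a t ih =>
      intro acc
      cases t with
      | nil => simp [pvAdjN]
      | cons b t' =>
          simp only [List.tail_cons, List.zip_cons_cons, List.foldl_cons]
          have := ih (acc + if a = b then 1 else 0)
          simp only [List.tail_cons] at this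
          rw [this, show pvAdjN (a :: b :: t') = (if a = b then 1 else 0) + pvAdjN (b :: t') from rfl]
          split_ifs with h <;> push_cast <;> ring

theorem pvAdjDup_eq (l : List Int) : pvAdjDup l = (pvAdjN l : Int) := by
  unfold pvAdjDup
  rw [PySem.List.slice_from_one, pvAdjDup_fold]
  ring

-- on a chain-sorted list, adjacent duplicates + distinct values = length
theorem pvAdjN_sorted : ∀ l : List Int, l.Pairwise (· ≤ ·) →
    pvAdjN l + l.toFinset.card = l.length := by
  intro l
  induction l with
  | nil => intro _; simp [pvAdjN]
  | cons a t ih =>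
      intro hp
      cases t with
      | nil => simp [pvAdjN]
      | cons b t' =>
          have hp' : (b :: t').Pairwise (· ≤ ·) := hp.of_cons
          have hab : a ≤ b := (List.pairwise_cons.mp hp).1 b (by simp)
          have ihs := ih hp'
          unfold pvAdjN
          by_cases h : a = b
          · subst h
            rw [if_pos rfl]
            simp only [List.toFinset_cons, Finset.insert_idem] at *
            simp only [List.length_cons] at *
            omega
          · have hnot : a ∉ (b :: t') := by
              intro hmem
              rcases List.mem_cons.mp hmem with h' | h'
              · exact h h'
              · have hba := (List.pairwise_cons.mp hp').1 a h'
                omega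
            rw [if_neg h]
            have hcard : (a :: b :: t').toFinset.card = (b :: t').toFinset.card + 1 := by
              simp only [List.toFinset_cons (a := a)]
              rw [Finset.card_insert_of_notMem (by simpa using hnot)]
            simp only [List.length_cons] at *
            omega

-- |set(xs)| = |xs.toFinset|
theorem pvSetCard (xs : List Int) : (PySem.Set.ofList xs).length = xs.toFinset.card := by
  have hperm : (PySem.Set.ofList xs).Perm xs.dedup := by
    rw [List.perm_ext_iff_of_nodup (PySem.Set.nodup_ofList xs) xs.nodup_dedup]
    intro a; simp [PySem.Set.mem_ofList]
  rw [hperm.length_eq, List.card_toFinset]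

-- B's sort-then-scan computes length - #distinct
theorem pvAdjDup_sorted (xs : List Int) :
    pvAdjDup (PySem.List.sorted xs (fun x => x) false)
      = (xs.length : Int) - ((PySem.Set.ofList xs).length : Int) := by
  have hperm : (PySem.List.sorted xs (fun x => x) false).Perm xs := PySem.List.sorted_perm xs _ _
  have hpw : (PySem.List.sorted xs (fun x => x) false).Pairwise (· ≤ ·) := by
    simpa using PySem.List.sorted_pairwise xs (fun x => x)
  have h := pvAdjN_sorted _ hpw
  have hlen := hperm.length_eq
  have hfin : (PySem.List.sorted xs (fun x => x) false).toFinset = xs.toFinset := by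
    apply Finset.ext; intro x
    simp only [List.mem_toFinset, hperm.mem_iff]
  rw [hfin, hlen] at h
  rw [pvAdjDup_eq, pvSetCard]
  omega

-- ===== VERDICT (by name: the statement is the Claim_ definition above) =====
theorem permutate_mistakes_spec : Claim_equal_permutate_mistakes := by
  intro matrix _ _
  unfold Spec_permutate_mistakes permutate_mistakes permutate_mistakes_alt
  refine (List.foldl_ext _ _ 0 ?_).symm
  intro acc i _
  have hpair := pvPairFold (PySem.List.pyRange 0 (matrix.length : Int) 1)
    (fun d j => pvCStep d (PySem.List.pyGetD (PySem.List.pyGetD matrix i []) j 0))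
    (fun d j => pvCStep d (PySem.List.pyGetD (PySem.List.pyGetD matrix j []) i 0))
    (PySem.Dict.empty, PySem.Dict.empty)
  rw [hpair]
  have hrow : List.foldl (fun d j => pvCStep d (PySem.List.pyGetD (PySem.List.pyGetD matrix i []) j 0))
      PySem.Dict.empty (PySem.List.pyRange 0 (matrix.length : Int) 1)
      = PySem.Dict.counter ((PySem.List.pyRange 0 (matrix.length : Int) 1).map
          (fun j => PySem.List.pyGetD (PySem.List.pyGetD matrix i []) j 0)) := by
    rw [← pvFoldCStep, List.foldl_map]
  have hcol : List.foldl (fun d j => pvCStep d (PySem.List.pyGetD (PySem.List.pyGetD matrix j []) i 0))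
      PySem.Dict.empty (PySem.List.pyRange 0 (matrix.length : Int) 1)
      = PySem.Dict.counter ((PySem.List.pyRange 0 (matrix.length : Int) 1).map
          (fun j => PySem.List.pyGetD (PySem.List.pyGetD matrix j []) i 0)) := by
    rw [← pvFoldCStep, List.foldl_map]
  rw [hrow, hcol, pvSumPass_counter, pvSumPass_counter]
  simp only [pvAdjDup_sorted, List.length_map]
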